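-- pv_equiv track=rewrite | github.com/homechan77/Algorithm | BOJ(solved.ac)/CLASS_2/Bronze_2231.py | solution
-- ===== SOURCE A (Python) =====
-- def solution(n):
--     for i in range(n+1):
--         ilist = list(str(i))
--         a=0
--         for j in ilist:
--             a+=int(j)
--         a+=i
--         if a == n:
--             return i
--     return 0
-- ===== SOURCE B (Python) =====
-- def solution(n):
--     # i + digitsum(i) == n forces i >= n - 9*len(str(n)), so scan only that short tail.
--     start = max(0, n - 9 * len(str(n)))
--     for i in range(start, n + 1):
--         s = 0
--         m = i
--         while m:
--             s += m % 10
--             m //= 10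
--         if s + i == n:
--             return i
--     return 0
-- ===== Notes on version B (the rewrite author's own statement) =====
-- stated objective: faster
-- what changed: Instead of scanning all i in [0, n] and summing the characters of str(i), B scans only the short tail [max(0, n - 9*len(str(n))), n] (any digit-sum generator of n must lie there) and computes each digit sum arithmetically with % and //.
import Mathlib
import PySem

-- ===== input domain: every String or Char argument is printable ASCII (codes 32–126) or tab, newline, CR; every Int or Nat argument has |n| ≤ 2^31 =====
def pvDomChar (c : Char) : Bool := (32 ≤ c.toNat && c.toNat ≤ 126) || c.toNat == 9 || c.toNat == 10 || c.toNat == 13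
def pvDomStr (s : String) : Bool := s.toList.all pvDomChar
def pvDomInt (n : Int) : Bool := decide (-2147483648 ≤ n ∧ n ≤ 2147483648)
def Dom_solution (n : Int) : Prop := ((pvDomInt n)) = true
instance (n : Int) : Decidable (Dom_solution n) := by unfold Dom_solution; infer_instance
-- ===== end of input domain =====

-- B scans only the tail [max(0, n-9*len(str(n))), n] (any generator i satisfies i ≥ n - 9*len(str(i)))
-- and computes the digit sum arithmetically instead of via str(); objective: faster.

-- ===== PORT A =====
-- for i in range(n+1): sum the characters of str(i) as ints, add i, return i on match; else 0.
def solutionLoopA (n : Int) : List Int → Int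
  | [] => 0
  | i :: rest =>
      let ilist := (PySem.Int.toStr i).toList
      -- a += int(j): i here is nonnegative, so int(j) never raises; .getD 0 is never taken
      let a := ilist.foldl (fun a j => a + (PySem.Int.ofChars? [j]).getD 0) 0
      let a := a + i
      if a = n then i else solutionLoopA n rest

def solution (n : Int) : Int := solutionLoopA n (PySem.List.pyRange 0 (n + 1) 1)

-- ===== PORT B =====
-- while m: s += m % 10; m //= 10  — the loop variable i is nonnegative, ported on Nat
def solutionDigitSum : Nat → Int
  | 0 => 0
  | m + 1 => (((m + 1) % 10 : Nat) : Int) + solutionDigitSum ((m + 1) / 10)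
  decreasing_by exact Nat.div_lt_self (Nat.succ_pos m) (by omega)

def solutionLoopB (n : Int) : List Int → Int
  | [] => 0
  | i :: rest => if solutionDigitSum i.toNat + i = n then i else solutionLoopB n rest

def solution_alt (n : Int) : Int :=
  let start := max 0 (n - 9 * PySem.Str.len (PySem.Int.toStr n))
  solutionLoopB n (PySem.List.pyRange start (n + 1) 1)

-- ===== PRECONDITION & SPEC =====
def Spec_solution (n : Int) (out : Int) : Prop := out = solution_alt n
instance (n : Int) (out : Int) : Decidable (Spec_solution n out) := by unfold Spec_solution; infer_instance

-- ===== CLAIM (what is proved, stated in full; the proofs are below) =====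
def Claim_equal_solution : Prop := ∀ (n : Int), Dom_solution n → Spec_solution n (solution n)

-- ===== LEMMAS AND PROOFS =====

-- big-endian decimal digits, the shape of Nat.toDigits 10
def solDigits (n : Nat) : List Char :=
  if _h : n < 10 then [Nat.digitChar n]
  else solDigits (n / 10) ++ [Nat.digitChar (n % 10)]
  decreasing_by exact Nat.div_lt_self (by omega) (by omega)

lemma solDigits_small {n : Nat} (h : n < 10) : solDigits n = [Nat.digitChar n] := by
  rw [solDigits, dif_pos h]

lemma solDigits_big {n : Nat} (h : ¬ n < 10) :
    solDigits n = solDigits (n / 10) ++ [Nat.digitChar (n % 10)] := by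
  rw [solDigits, dif_neg h]

lemma toDigitsCore_eq_solDigits (f : Nat) : ∀ (n : Nat) (ds : List Char), n < f →
    Nat.toDigitsCore 10 f n ds = solDigits n ++ ds := by
  induction f with
  | zero => intro n ds h; omega
  | succ f ih =>
      intro n ds h
      rw [Nat.toDigitsCore]
      by_cases h10 : n / 10 = 0
      · have hn : n < 10 := by omega
        rw [if_pos h10, solDigits_small hn, Nat.mod_eq_of_lt hn]
        rfl
      · have hlt : n / 10 < f := by
          have := Nat.div_lt_self (by omega : 0 < n) (by omega : 1 < 10)
          omega
        rw [if_neg h10, ih (n / 10) _ hlt]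
        conv_rhs => rw [solDigits_big (by omega : ¬ n < 10)]
        simp

lemma toDigits_eq_solDigits (n : Nat) : Nat.toDigits 10 n = solDigits n := by
  have := toDigitsCore_eq_solDigits (n + 1) n [] (Nat.lt_succ_self n)
  simpa [Nat.toDigits] using this

def solVal (c : Char) : Int := (PySem.Int.ofChars? [c]).getD 0

lemma solVal_digitChar (k : Nat) (hk : k < 10) : solVal (Nat.digitChar k) = (k : Int) := by
  interval_cases k <;> decide

lemma foldl_add_solVal (l : List Char) (a : Int) :
    l.foldl (fun a j => a + solVal j) a = a + (l.map solVal).sum := by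
  induction l generalizing a with
  | nil => simp
  | cons c l ih => simp [List.foldl, ih, add_assoc]

lemma sum_solDigits (m : Nat) : ((solDigits m).map solVal).sum = solutionDigitSum m := by
  induction m using Nat.strong_induction_on with
  | _ m ih =>
      by_cases h : m < 10
      · rw [solDigits_small h]
        cases m with
        | zero => simp [solVal_digitChar 0 (by omega), solutionDigitSum]
        | succ k =>
            rw [solutionDigitSum]
            have h1 : (k + 1) % 10 = k + 1 := Nat.mod_eq_of_lt h
            have h2 : (k + 1) / 10 = 0 := Nat.div_eq_of_lt h
            simp [solVal_digitChar (k + 1) h, h1, h2, solutionDigitSum]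
      · rw [solDigits_big h]
        have hm : m / 10 < m := Nat.div_lt_self (by omega) (by omega)
        obtain ⟨k, hk⟩ : ∃ k, m = k + 1 := ⟨m - 1, by omega⟩
        subst hk
        rw [solutionDigitSum]
        simp [ih _ hm, solVal_digitChar _ (Nat.mod_lt _ (by omega))]
        ring

lemma sum_solDigits_le (m : Nat) :
    ((solDigits m).map solVal).sum ≤ 9 * ((solDigits m).length : Int) := by
  induction m using Nat.strong_induction_on with
  | _ m ih =>
      by_cases h : m < 10
      · rw [solDigits_small h]
        simp [solVal_digitChar m h]
        omega
      · rw [solDigits_big h]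
        have hm : m / 10 < m := Nat.div_lt_self (by omega) (by omega)
        have := ih _ hm
        simp [solVal_digitChar _ (Nat.mod_lt _ (by omega : 0 < 10))]
        have : (m % 10 : Int) ≤ 9 := by
          have := Nat.mod_lt m (by omega : 0 < 10)
          omega
        omega

lemma solDigits_len_mono (m n : Nat) (h : m ≤ n) :
    (solDigits m).length ≤ (solDigits n).length := by
  induction n using Nat.strong_induction_on generalizing m with
  | _ n ih =>
      by_cases hn : n < 10
      · rw [solDigits_small hn, solDigits_small (by omega : m < 10)]
        simp
      · rw [solDigits_big hn]
        by_cases hm : m < 10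
        · rw [solDigits_small hm]
          simp
        · rw [solDigits_big hm]
          have h1 : n / 10 < n := Nat.div_lt_self (by omega) (by omega)
          have h2 : m / 10 ≤ n / 10 := Nat.div_le_div_right h
          simp [ih _ h1 _ h2]

lemma dsA_eq (i : Int) (hi : 0 ≤ i) :
    (PySem.Int.toStr i).toList.foldl (fun a j => a + (PySem.Int.ofChars? [j]).getD 0) 0
      = ((solDigits i.toNat).map solVal).sum := by
  rw [PySem.Int.toList_toStr]
  have hch : PySem.Int.toChars i = solDigits i.toNat := by
    rw [PySem.Int.toChars, if_neg (by omega), toDigits_eq_solDigits]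
  rw [hch]
  have := foldl_add_solVal (solDigits i.toNat) 0
  simpa [solVal] using this

lemma loopA_eq_loopB (n : Int) (l : List Int) (h : ∀ i ∈ l, 0 ≤ i) :
    solutionLoopA n l = solutionLoopB n l := by
  induction l with
  | nil => rfl
  | cons i l ih =>
      have hi : 0 ≤ i := h i (by simp)
      rw [solutionLoopA, solutionLoopB]
      simp only [dsA_eq i hi, sum_solDigits]
      split_ifs with hx
      · rfl
      · exact ih (fun j hj => h j (by simp [hj]))

lemma loopA_append_skip (n : Int) (l1 l2 : List Int)
    (h : ∀ i ∈ l1,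
      (PySem.Int.toStr i).toList.foldl (fun a j => a + (PySem.Int.ofChars? [j]).getD 0) 0 + i ≠ n) :
    solutionLoopA n (l1 ++ l2) = solutionLoopA n l2 := by
  induction l1 with
  | nil => rfl
  | cons i l ih =>
      rw [List.cons_append, solutionLoopA]
      simp only [if_neg (h i (by simp))]
      exact ih (fun j hj => h j (by simp [hj]))

lemma len_toStr_eq (n : Int) (hn : 0 ≤ n) :
    PySem.Str.len (PySem.Int.toStr n) = ((solDigits n.toNat).length : Int) := by
  rw [PySem.Str.len, PySem.Int.toList_toStr, PySem.Int.toChars, if_neg (by omega),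
    toDigits_eq_solDigits]

theorem solution_spec : Claim_equal_solution := by
  intro n _
  unfold Spec_solution solution solution_alt
  by_cases hn : 0 ≤ n
  · set L : Int := PySem.Str.len (PySem.Int.toStr n) with hL
    have hLval : L = ((solDigits n.toNat).length : Int) := len_toStr_eq n hn
    have hL0 : 0 ≤ L := by rw [hLval]; positivity
    set s0 : Int := max 0 (n - 9 * L) with hs0
    have h0s : 0 ≤ s0 := le_max_left _ _
    have hsn : s0 ≤ n + 1 := by omega
    rw [PySem.List.pyRange_one_append 0 s0 (n + 1) h0s hsn]
    rw [loopA_append_skip]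
    · exact loopA_eq_loopB n _ (fun i hi => by
        have := (PySem.List.mem_pyRange_one.mp hi).1
        omega)
    · intro i hi
      obtain ⟨hi0, hi1⟩ := PySem.List.mem_pyRange_one.mp hi
      have hilt : i < n - 9 * L := by omega
      rw [dsA_eq i hi0]
      have h1 : ((solDigits i.toNat).map solVal).sum ≤ 9 * ((solDigits i.toNat).length : Int) :=
        sum_solDigits_le i.toNat
      have h2 : (solDigits i.toNat).length ≤ (solDigits n.toNat).length :=
        solDigits_len_mono _ _ (by omega)
      have h2' : ((solDigits i.toNat).length : Int) ≤ ((solDigits n.toNat).length : Int) := by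
        exact_mod_cast h2
      omega
  · rw [PySem.List.pyRange_one_eq_nil (by omega : n + 1 ≤ 0)]
    show solutionLoopA n [] = solutionLoopB n
      (PySem.List.pyRange (max 0 (n - 9 * PySem.Str.len (PySem.Int.toStr n))) (n + 1) 1)
    rw [PySem.List.pyRange_one_eq_nil
      (by omega : n + 1 ≤ max 0 (n - 9 * PySem.Str.len (PySem.Int.toStr n)))]
    rfl
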